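-- pv_equiv track=rewrite | github.com/pinkcaden/YahtzeeClone | PlayerData.py | score_ls
-- ===== SOURCE A (Python) =====
-- def score_ls(occ):  ## Good
--
--     search = 1
--     if occ[1] == 0:
--         search += 1
--
--     for i in range(search, search + 5):
--
--         if occ[i] == 0:
--             return 0
--
--     return 40
-- ===== SOURCE B (Python) =====
-- def score_ls(occ):
--     # Directly test the two possible large straights (faces 1-5 or faces 2-6),
--     # short-circuiting at the first missing face.
--     small = all(occ[i] != 0 for i in range(1, 6))
--     return 40 if small or all(occ[i] != 0 for i in range(2, 7)) else 0
-- ===== Notes on version B (the rewrite author's own statement) =====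
-- stated objective: simpler
-- what changed: Drops A's adaptive search-offset and single scanning loop with early return, instead directly testing the two possible large-straight windows (faces 1-5 all present OR faces 2-6 all present) with short-circuiting all()/or.
import Mathlib
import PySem

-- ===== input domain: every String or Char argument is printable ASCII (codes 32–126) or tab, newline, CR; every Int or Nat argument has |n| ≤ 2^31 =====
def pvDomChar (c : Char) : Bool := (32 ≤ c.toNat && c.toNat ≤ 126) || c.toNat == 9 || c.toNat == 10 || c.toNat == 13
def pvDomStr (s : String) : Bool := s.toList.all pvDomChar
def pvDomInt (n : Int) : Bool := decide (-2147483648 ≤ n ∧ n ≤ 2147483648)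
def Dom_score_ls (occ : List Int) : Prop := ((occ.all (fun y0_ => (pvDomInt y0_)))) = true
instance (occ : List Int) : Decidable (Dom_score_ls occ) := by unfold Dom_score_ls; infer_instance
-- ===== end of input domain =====

-- B replaces A's adaptive-offset scan by directly testing the two possible straight windows
-- (faces 1-5 or faces 2-6) with short-circuit evaluation; objective: simpler.

-- ===== PORT A =====
-- the `for i in range(search, search+5): if occ[i] == 0: return 0` loop
def scoreLsLoop (occ : List Int) : List Int → Int
  | [] => 40
  | i :: rest => if PySem.List.pyGetD occ i 0 = 0 then 0 else scoreLsLoop occ rest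

def score_ls (occ : List Int) : Int :=
  let search : Int := if PySem.List.pyGetD occ 1 0 = 0 then 1 + 1 else 1
  scoreLsLoop occ (PySem.List.pyRange search (search + 5) 1)

-- ===== PORT B =====
-- all(occ[i] != 0 for i in range(lo, hi))
def scoreLsWin (occ : List Int) (lo hi : Int) : Bool :=
  (PySem.List.pyRange lo hi 1).all (fun i => PySem.List.pyGetD occ i 0 != 0)

def score_ls_alt (occ : List Int) : Int :=
  if scoreLsWin occ 1 6 || scoreLsWin occ 2 7 then 40 else 0

-- ===== PRECONDITION & SPEC =====
-- Pre_ = exactly the inputs on which Python A returns (no IndexError): the list is long enough for the first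
-- read, and the scanned window either lies fully in range or contains a zero before the list runs out.
-- (The Lean ports totalise out-of-range reads with getD 0 and happen to agree everywhere, so the
-- proof needs no hypothesis; Pre_ still delimits where Python A actually returns.)
def Pre_score_ls (occ : List Int) : Prop :=
  2 ≤ occ.length ∧
    ((occ.getD 1 0 ≠ 0 ∧ (6 ≤ occ.length ∨ (0 : Int) ∈ occ.drop 1)) ∨
     (occ.getD 1 0 = 0 ∧ (7 ≤ occ.length ∨ (0 : Int) ∈ occ.drop 2)))
instance (occ : List Int) : Decidable (Pre_score_ls occ) := by unfold Pre_score_ls; infer_instance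
def pvWitness_score_ls : List Int := [0, 1, 1, 1, 1, 1, 1]

def Spec_score_ls (occ : List Int) (out : Int) : Prop := out = score_ls_alt occ
instance (occ : List Int) (out : Int) : Decidable (Spec_score_ls occ out) := by unfold Spec_score_ls; infer_instance

-- ===== CLAIM (what is proved, stated in full; the proofs are below) =====
def Claim_equal_score_ls : Prop := ∀ (occ : List Int), Dom_score_ls occ → Pre_score_ls occ → Spec_score_ls occ (score_ls occ)

-- ===== LEMMAS AND PROOFS =====
lemma range16 : PySem.List.pyRange 1 6 1 = [1, 2, 3, 4, 5] := by decide
lemma range27 : PySem.List.pyRange 2 7 1 = [2, 3, 4, 5, 6] := by decide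

-- the two ports agree on every input (the getD-0 reading of an out-of-range cell
-- makes both return 0 there, so no precondition is even needed for the equation)
lemma score_ls_eq_alt (occ : List Int) : score_ls occ = score_ls_alt occ := by
  unfold score_ls score_ls_alt scoreLsWin
  by_cases h1 : PySem.List.pyGetD occ 1 0 = 0 <;>
    simp only [h1, if_pos, ite_false, range16, range27, show (1:Int)+1 = 2 by norm_num, show (2:Int)+5 = 7 by norm_num,
      show (1:Int)+5 = 6 by norm_num, List.all_cons, List.all_nil, scoreLsLoop] <;>
    by_cases h2 : PySem.List.pyGetD occ 2 0 = 0 <;>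
    by_cases h3 : PySem.List.pyGetD occ 3 0 = 0 <;>
    by_cases h4 : PySem.List.pyGetD occ 4 0 = 0 <;>
    by_cases h5 : PySem.List.pyGetD occ 5 0 = 0 <;>
    by_cases h6 : PySem.List.pyGetD occ 6 0 = 0 <;>
    simp_all

-- ===== VERDICT (by name: the statement is the Claim_ definition above) =====
theorem score_ls_spec : Claim_equal_score_ls := by
  intro occ _ _
  exact score_ls_eq_alt occ
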